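-- pv_equiv track=rewrite | github.com/Kykim0818/malang_malang | week3/Programmers_86052_220704/서원우.py | solution
-- ===== SOURCE A (Python) =====
-- def solution(grid):
--     dir = [[1, 0], [0, -1], [-1, 0], [0, 1]] # 방향
--
--     rows, columns = len(grid), len(grid[0]) #그리드 길이, 넓이
--     visited = [[[False for _ in range(4)] for _ in range(columns)] for _ in range(rows)] # 방문하지 않은 그리드 그리기
--     ans = []
--
--     for i in range(rows):
--         for j in range(columns):
--             for k in range(4): # 방향
--                 if not visited[i][j][k]:
--                     dx, dy, dd = i, j, k
--                     count = 0
--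
--                     # 방문하지 않았다면
--                     while not visited[dx][dy][dd]:
--                         visited[dx][dy][dd] = True
--                         count += 1
--
--                         # 새로운 방향 L/R, 그리드 밖으로 나간다면 다시 돌아오도록
--                         nx, ny = dir[dd]
--                         dx, dy = (dx + nx) % rows, (dy + ny) % columns
--
--                         if grid[dx][dy] == 'L':
--                             dd = (dd-1) % 4
--                         elif grid[dx][dy] == 'R':
--                             dd = (dd+1) % 4
--
--                     ans.append(count)
--
--     return sorted(ans)
-- ===== SOURCE B (Python) =====
-- def solution(grid):
--     rows, cols = len(grid), len(grid[0])
--     n = rows * cols * 4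
--     di = (1, 0, -1, 0)
--     dj = (0, -1, 0, 1)
--
--     def step(s):
--         k = s % 4
--         c = (s // 4) % cols
--         r = s // (4 * cols)
--         r2 = (r + di[k]) % rows
--         c2 = (c + dj[k]) % cols
--         ch = grid[r2][c2]
--         if ch == 'L':
--             k = (k + 3) % 4
--         elif ch == 'R':
--             k = (k + 1) % 4
--         return (r2 * cols + c2) * 4 + k
--
--     # The beam transition is a permutation of the n states, so the states split
--     # into pure cycles.  Cycle-leader counting: each cycle is counted exactly once,
--     # at its smallest state, with no visited structure at all.
--     counts = []
--     for s in range(n):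
--         cur, cnt = step(s), 1
--         while cur > s:
--             cur = step(cur)
--             cnt += 1
--         if cur == s:
--             counts.append(cnt)
--     return sorted(counts)
-- ===== Notes on version B (the rewrite author's own statement) =====
-- stated objective: alternative
-- what changed: Replaces A's 3D visited-array marking walks by cycle-leader counting over integer-encoded states: since the beam transition is a permutation, B keeps no visited structure at all and counts each cycle exactly once, at its smallest state, by following the transition until it falls to a state <= the start.
import Mathlib
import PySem

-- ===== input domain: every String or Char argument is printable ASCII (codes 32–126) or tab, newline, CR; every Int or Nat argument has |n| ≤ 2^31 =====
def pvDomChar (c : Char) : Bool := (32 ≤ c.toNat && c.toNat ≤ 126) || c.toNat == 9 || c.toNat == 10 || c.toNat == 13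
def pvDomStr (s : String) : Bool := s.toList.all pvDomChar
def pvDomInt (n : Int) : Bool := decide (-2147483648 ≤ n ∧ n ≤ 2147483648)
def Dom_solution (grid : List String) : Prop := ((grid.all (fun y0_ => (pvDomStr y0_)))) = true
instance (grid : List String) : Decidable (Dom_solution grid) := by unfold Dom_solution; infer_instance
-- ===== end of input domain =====

-- B replaces A's visited-array walks by cycle-leader counting over integer-encoded
-- states: the beam transition is a permutation, so B counts each cycle exactly once,
-- at its smallest state, using no visited structure (objective: alternative).

-- ===== PORT A =====
-- A's `dir` table.
def dirA : List (Int × Int) := [(1, 0), (0, -1), (-1, 0), (0, 1)]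

-- visited[i][j][k]; under Pre_ every index used is in range, so `getD` is exact.
def getV (v : List (List (List Bool))) (i j k : Nat) : Bool :=
  (((v.getD i []).getD j []).getD k false)

def setV (v : List (List (List Bool))) (i j k : Nat) : List (List (List Bool)) :=
  v.set i ((v.getD i []).set j (((v.getD i []).getD j []).set k true))

-- the body of A's while loop after the mark: one move + turn.  Python's `%` with a
-- positive divisor is Int.emod; indices are nonnegative and in range under Pre_.
def stepA (grid : List String) (rows cols : Nat) (p : Nat × Nat × Nat) : Nat × Nat × Nat :=
  let nx := (dirA.getD p.2.2 (0, 0)).1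
  let ny := (dirA.getD p.2.2 (0, 0)).2
  let dx' := (((p.1 : Int) + nx) % rows).toNat
  let dy' := (((p.2.1 : Int) + ny) % cols).toNat
  let ch := (grid.getD dx' "").toList.getD dy' ' '
  let dd' := if ch = 'L' then (((p.2.2 : Int) - 1) % 4).toNat
             else if ch = 'R' then (((p.2.2 : Int) + 1) % 4).toNat
             else p.2.2
  (dx', dy', dd')

-- A's while loop; fuel rows*cols*4+1 is enough since each iteration marks a fresh state.
def loopA (grid : List String) (rows cols : Nat) :
    Nat → List (List (List Bool)) → Nat × Nat × Nat → Nat → List (List (List Bool)) × Nat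
  | 0, v, _, count => (v, count)
  | fuel + 1, v, p, count =>
    if getV v p.1 p.2.1 p.2.2 then (v, count)
    else loopA grid rows cols fuel (setV v p.1 p.2.1 p.2.2) (stepA grid rows cols p) (count + 1)

def solution (grid : List String) : List Int :=
  let rows := grid.length
  let cols := (grid.headD "").length
  let init : List (List (List Bool)) :=
    (List.range rows).map (fun _ => (List.range cols).map (fun _ => (List.range 4).map (fun _ => false)))
  let res :=
    (List.range rows).foldl (fun st i =>
      (List.range cols).foldl (fun st j =>
        (List.range 4).foldl (fun (st : List (List (List Bool)) × List Int) k =>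
          if getV st.1 i j k then st
          else
            let r := loopA grid rows cols (rows * cols * 4 + 1) st.1 (i, j, k) 0
            (r.1, st.2 ++ [(r.2 : Int)])) st) st) (init, [])
  PySem.List.sorted res.2 (fun x => x) false

-- ===== PORT B =====
-- Source B's `step` helper: decode s, move with wraparound, turn by the destination cell.
def stepB (grid : List String) (rows cols : Nat) (s : Nat) : Nat :=
  let k := s % 4
  let c := (s / 4) % cols
  let r := s / (4 * cols)
  let r2 := (((r : Int) + ([(1 : Int), 0, -1, 0].getD k 0)) % rows).toNat
  let c2 := (((c : Int) + ([(0 : Int), -1, 0, 1].getD k 0)) % cols).toNat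
  let ch := (grid.getD r2 "").toList.getD c2 ' '
  let k2 := if ch = 'L' then (k + 3) % 4 else if ch = 'R' then (k + 1) % 4 else k
  (r2 * cols + c2) * 4 + k2

-- Source B's while loop: follow `step` while cur > s; fuel rows*cols*4 is enough since
-- the transition is a permutation, so the walk returns to a state ≤ s within n steps.
def walkLeader (grid : List String) (rows cols s : Nat) : Nat → Nat → Nat → Nat × Nat
  | 0, cur, cnt => (cur, cnt)
  | fuel + 1, cur, cnt =>
    if s < cur then walkLeader grid rows cols s fuel (stepB grid rows cols cur) (cnt + 1)
    else (cur, cnt)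

def solution_alt (grid : List String) : List Int :=
  let rows := grid.length
  let cols := (grid.headD "").length
  let n := rows * cols * 4
  let counts :=
    (List.range n).foldl (fun (acc : List Int) s =>
      let r := walkLeader grid rows cols s n (stepB grid rows cols s) 1
      if r.1 = s then acc ++ [(r.2 : Int)] else acc) []
  PySem.List.sorted counts (fun x => x) false

-- ===== PRECONDITION & SPEC =====
-- Pre_ excludes exactly the inputs where A raises: the empty grid (grid[0] → IndexError)
-- and grids with a row shorter than row 0 (grid[dx][dy] → IndexError, every cell is read).
def Pre_solution (grid : List String) : Prop :=
  grid ≠ [] ∧ ∀ s ∈ grid, (grid.headD "").length ≤ s.length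
instance (grid : List String) : Decidable (Pre_solution grid) := by
  unfold Pre_solution; infer_instance

def pvWitness_solution : List String := ["SL", "RS"]

def Spec_solution (grid : List String) (out : List Int) : Prop := out = solution_alt grid
instance (grid : List String) (out : List Int) : Decidable (Spec_solution grid out) := by
  unfold Spec_solution; infer_instance

-- ===== CLAIM (what is proved, stated in full; the proofs are below) =====
def Claim_equal_solution : Prop :=
  ∀ (grid : List String), Dom_solution grid → Pre_solution grid → Spec_solution grid (solution grid)

-- ===== LEMMAS AND PROOFS =====

-- proof-side abstract versions of the two walks, over an arbitrary state map f
def walkSeen (f : Nat → Nat) : Nat → List Bool → Nat → Nat → List Bool × Nat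
  | 0, seen, _, cnt => (seen, cnt)
  | fuel + 1, seen, cur, cnt =>
    if seen.getD cur false then (seen, cnt)
    else walkSeen f fuel (seen.set cur true) (f cur) (cnt + 1)

def walkF (f : Nat → Nat) (s : Nat) : Nat → Nat → Nat → Nat × Nat
  | 0, cur, cnt => (cur, cnt)
  | fuel + 1, cur, cnt =>
    if s < cur then walkF f s fuel (f cur) (cnt + 1) else (cur, cnt)

-- inverse of stepB (proof-side only), used to show stepB is a permutation
def stepInv (grid : List String) (rows cols : Nat) (s : Nat) : Nat :=
  let k' := s % 4
  let c' := (s / 4) % cols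
  let r' := s / (4 * cols)
  let ch := (grid.getD r' "").toList.getD c' ' '
  let k := if ch = 'L' then (k' + 1) % 4 else if ch = 'R' then (k' + 3) % 4 else k'
  let r := (((r' : Int) - ([(1 : Int), 0, -1, 0].getD k 0)) % rows).toNat
  let c := (((c' : Int) - ([(0 : Int), -1, 0, 1].getD k 0)) % cols).toNat
  (r * cols + c) * 4 + k

-- small List.getD facts used throughout
theorem pvGetD_set_self {a : Type} (l : List a) (i : Nat) (x d : a) (h : i < l.length) :
    (l.set i x).getD i d = x := by
  simp [List.getD_eq_getElem?_getD, h]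

theorem pvGetD_set_ne {a : Type} (l : List a) {i j : Nat} (x d : a) (h : i ≠ j) :
    (l.set i x).getD j d = l.getD j d := by
  simp [List.getD_eq_getElem?_getD, h]

theorem pvGetD_mem {a : Type} (l : List a) (i : Nat) (d : a) (h : i < l.length) :
    l.getD i d ∈ l := by
  rw [List.getD_eq_getElem?_getD, List.getElem?_eq_getElem h, Option.getD_some]
  exact List.getElem_mem h

theorem pvGetD_replicate {a : Type} (n s : Nat) (d : a) :
    (List.replicate n d).getD s d = d := by
  simp [List.getD_eq_getElem?_getD, List.getElem?_replicate]
  split <;> simp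

-- encode/decode arithmetic
theorem enc_lt {rows cols i j k : Nat} (hi : i < rows) (hj : j < cols) (hk : k < 4) :
    (i * cols + j) * 4 + k < rows * cols * 4 := by
  have h1 : i * cols + j + 1 ≤ rows * cols := by
    calc i * cols + j + 1 ≤ i * cols + cols := by omega
    _ = (i + 1) * cols := by ring
    _ ≤ rows * cols := Nat.mul_le_mul_right _ hi
  calc (i * cols + j) * 4 + k < (i * cols + j + 1) * 4 := by omega
  _ ≤ rows * cols * 4 := Nat.mul_le_mul_right _ h1

theorem dec_k {cols i j k : Nat} (hk : k < 4) : ((i * cols + j) * 4 + k) % 4 = k := by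
  rw [show (i * cols + j) * 4 + k = k + (i * cols + j) * 4 from by ring]
  simp [Nat.mod_eq_of_lt hk]

theorem dec_j {cols i j k : Nat} (hj : j < cols) (hk : k < 4) :
    (((i * cols + j) * 4 + k) / 4) % cols = j := by
  have h1 : ((i * cols + j) * 4 + k) / 4 = i * cols + j := by
    rw [mul_comm (i * cols + j) 4, Nat.mul_add_div (by norm_num), Nat.div_eq_of_lt hk,
      Nat.add_zero]
  rw [h1, show i * cols + j = j + i * cols from by ring]
  simp [Nat.mod_eq_of_lt hj]

theorem dec_i {cols i j k : Nat} (hj : j < cols) (hk : k < 4) :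
    ((i * cols + j) * 4 + k) / (4 * cols) = i := by
  have hb : 0 < 4 * cols := by omega
  have hlt : j * 4 + k < 4 * cols := by
    calc j * 4 + k < (j + 1) * 4 := by omega
    _ ≤ cols * 4 := Nat.mul_le_mul_right _ (by omega)
    _ = 4 * cols := by ring
  rw [show (i * cols + j) * 4 + k = 4 * cols * i + (j * 4 + k) from by ring,
    Nat.mul_add_div hb, Nat.div_eq_of_lt hlt, Nat.add_zero]

theorem enc_dec (cols s : Nat) :
    (s / (4 * cols) * cols + (s / 4) % cols) * 4 + s % 4 = s := by
  have h1 : s / (4 * cols) = s / 4 / cols := by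
    rw [Nat.div_div_eq_div_mul]
  have h2 : s / 4 / cols * cols + (s / 4) % cols = s / 4 := by
    rw [mul_comm]; exact Nat.div_add_mod _ _
  have h3 : 4 * (s / 4) + s % 4 = s := Nat.div_add_mod s 4
  rw [h1, h2]
  omega

theorem enc_inj {cols i j k i' j' k' : Nat} (hj : j < cols) (hk : k < 4)
    (hj' : j' < cols) (hk' : k' < 4)
    (h : (i * cols + j) * 4 + k = (i' * cols + j') * 4 + k') : i = i' ∧ j = j' ∧ k = k' := by
  refine ⟨?_, ?_, ?_⟩
  · rw [← dec_i (i := i) hj hk, h, dec_i hj' hk']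
  · rw [← dec_j (i := i) hj hk, h, dec_j hj' hk']
  · rw [← dec_k (cols := cols) (i := i) (j := j) hk, h, dec_k hk']

theorem stepA_lt (grid : List String) (rows cols : Nat) (p : Nat × Nat × Nat)
    (hr : 0 < rows) (hc : 0 < cols) (hk : p.2.2 < 4) :
    (stepA grid rows cols p).1 < rows ∧ (stepA grid rows cols p).2.1 < cols ∧
      (stepA grid rows cols p).2.2 < 4 := by
  have hrZ : (0 : Int) < rows := by exact_mod_cast hr
  have hcZ : (0 : Int) < cols := by exact_mod_cast hc
  have h1 : (0 : Int) ≤ ((p.1 : Int) + (dirA.getD p.2.2 (0, 0)).1) % rows :=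
    Int.emod_nonneg _ (by omega)
  have h2 : ((p.1 : Int) + (dirA.getD p.2.2 (0, 0)).1) % rows < rows :=
    Int.emod_lt_of_pos _ hrZ
  have h3 : (0 : Int) ≤ ((p.2.1 : Int) + (dirA.getD p.2.2 (0, 0)).2) % cols :=
    Int.emod_nonneg _ (by omega)
  have h4 : ((p.2.1 : Int) + (dirA.getD p.2.2 (0, 0)).2) % cols < cols :=
    Int.emod_lt_of_pos _ hcZ
  have h5 : (0 : Int) ≤ ((p.2.2 : Int) - 1) % 4 := Int.emod_nonneg _ (by norm_num)
  have h6 : ((p.2.2 : Int) - 1) % 4 < 4 := Int.emod_lt_of_pos _ (by norm_num)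
  have h7 : (0 : Int) ≤ ((p.2.2 : Int) + 1) % 4 := Int.emod_nonneg _ (by norm_num)
  have h8 : ((p.2.2 : Int) + 1) % 4 < 4 := Int.emod_lt_of_pos _ (by norm_num)
  have hfst : (stepA grid rows cols p).1
      = (((p.1 : Int) + (dirA.getD p.2.2 (0, 0)).1) % rows).toNat := rfl
  have hsnd : (stepA grid rows cols p).2.1
      = (((p.2.1 : Int) + (dirA.getD p.2.2 (0, 0)).2) % cols).toNat := rfl
  have hthd : (stepA grid rows cols p).2.2
      = (if (grid.getD ((((p.1 : Int) + (dirA.getD p.2.2 (0, 0)).1) % rows).toNat) "").toList.getD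
              ((((p.2.1 : Int) + (dirA.getD p.2.2 (0, 0)).2) % cols).toNat) ' ' = 'L' then
            (((p.2.2 : Int) - 1) % 4).toNat
          else if (grid.getD ((((p.1 : Int) + (dirA.getD p.2.2 (0, 0)).1) % rows).toNat) "").toList.getD
              ((((p.2.1 : Int) + (dirA.getD p.2.2 (0, 0)).2) % cols).toNat) ' ' = 'R' then
            (((p.2.2 : Int) + 1) % 4).toNat
          else p.2.2) := rfl
  rw [hfst, hsnd, hthd]
  refine ⟨by omega, by omega, ?_⟩
  split_ifs <;> omega

theorem getV_setV {rows cols : Nat} (v : List (List (List Bool))) (hs : v.length = rows ∧ ∀ r ∈ v, r.length = cols ∧ ∀ c ∈ r, c.length = 4)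
    {i j k : Nat} (hi : i < rows) (hj : j < cols) (hk : k < 4) (i' j' k' : Nat) :
    getV (setV v i j k) i' j' k'
      = if i' = i ∧ j' = j ∧ k' = k then true else getV v i' j' k' := by
  obtain ⟨hlen, hrow⟩ := hs
  by_cases hii : i' = i
  · subst hii
    have hiv : i' < v.length := by omega
    obtain ⟨hrlen, hcell⟩ := hrow _ (pvGetD_mem v i' [] hiv)
    unfold getV setV
    rw [pvGetD_set_self _ _ _ _ hiv]
    by_cases hjj : j' = j
    · subst hjj
      have hjl : j' < (v.getD i' []).length := by omega
      have h4 := hcell _ (pvGetD_mem (v.getD i' []) j' [] hjl)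
      rw [pvGetD_set_self _ _ _ _ hjl]
      by_cases hkk : k' = k
      · subst hkk
        rw [pvGetD_set_self _ _ _ _ (by omega)]
        simp
      · rw [pvGetD_set_ne _ _ _ (fun h => hkk h.symm)]
        simp [hkk]
    · rw [pvGetD_set_ne _ _ _ (fun h => hjj h.symm)]
      simp [hjj]
  · unfold getV setV
    rw [pvGetD_set_ne _ _ _ (fun h => hii h.symm)]
    simp [hii]

theorem shapeV_setV {rows cols : Nat} (v : List (List (List Bool))) (hs : v.length = rows ∧ ∀ r ∈ v, r.length = cols ∧ ∀ c ∈ r, c.length = 4)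
    {i j k : Nat} (hi : i < rows) (hj : j < cols) :
    (setV v i j k).length = rows ∧ ∀ r ∈ setV v i j k, r.length = cols ∧ ∀ c ∈ r, c.length = 4 := by
  obtain ⟨hlen, hrow⟩ := hs
  refine ⟨by simp [setV, hlen], ?_⟩
  intro r hr
  rcases List.mem_or_eq_of_mem_set hr with h | h
  · exact hrow r h
  · subst h
    have hiv : i < v.length := by omega
    obtain ⟨hrlen, hcell⟩ := hrow _ (pvGetD_mem v i [] hiv)
    refine ⟨by rw [List.length_set]; exact hrlen, ?_⟩
    intro c hc
    rcases List.mem_or_eq_of_mem_set hc with h2 | h2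
    · exact hcell c h2
    · subst h2
      have hjl : j < (v.getD i []).length := by omega
      have h4 := hcell _ (pvGetD_mem _ j [] hjl)
      rw [List.length_set]
      exact h4

-- stepB at an encoded in-range state computes exactly A's one step
theorem stepB_enc (grid : List String) {rows cols i j k : Nat}
    (hi : i < rows) (hj : j < cols) (hk : k < 4) :
    stepB grid rows cols ((i * cols + j) * 4 + k) =
      ((stepA grid rows cols (i, j, k)).1 * cols + (stepA grid rows cols (i, j, k)).2.1) * 4
        + (stepA grid rows cols (i, j, k)).2.2 := by
  unfold stepB
  simp only [dec_k hk, dec_j hj hk, dec_i hj hk, stepA, dirA]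
  interval_cases k <;> simp

theorem stepB_lt (grid : List String) {rows cols : Nat} (hr : 0 < rows) (hc : 0 < cols)
    (s : Nat) : stepB grid rows cols s < rows * cols * 4 := by
  have hrZ : (0 : Int) < rows := by exact_mod_cast hr
  have hcZ : (0 : Int) < cols := by exact_mod_cast hc
  have h1 : (0 : Int) ≤ (((s / (4 * cols) : Nat) : Int) + ([(1 : Int), 0, -1, 0].getD (s % 4) 0)) % rows :=
    Int.emod_nonneg _ (by omega)
  have h2 : (((s / (4 * cols) : Nat) : Int) + ([(1 : Int), 0, -1, 0].getD (s % 4) 0)) % rows < rows :=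
    Int.emod_lt_of_pos _ hrZ
  have h3 : (0 : Int) ≤ ((((s / 4) % cols : Nat) : Int) + ([(0 : Int), -1, 0, 1].getD (s % 4) 0)) % cols :=
    Int.emod_nonneg _ (by omega)
  have h4 : ((((s / 4) % cols : Nat) : Int) + ([(0 : Int), -1, 0, 1].getD (s % 4) 0)) % cols < cols :=
    Int.emod_lt_of_pos _ hcZ
  refine enc_lt (by omega) (by omega) ?_
  split_ifs <;> omega

-- ((x + d) mod m - d) mod m = x for 0 ≤ x < m
theorem pv_unshift (x d m : Int) (hx : 0 ≤ x) (hxm : x < m) :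
    (((x + d) % m) - d) % m = x := by
  rw [sub_eq_add_neg, Int.add_emod, Int.emod_emod_of_dvd _ dvd_rfl, ← Int.add_emod,
    add_neg_cancel_right]
  exact Int.emod_eq_of_lt hx hxm

-- the pure arithmetic of undoing one move+turn, with the destination cell generalized
theorem pv_roundtrip {rows cols r c k : Nat} (hr : 0 < rows) (hc : 0 < cols)
    (hrb : r < rows) (hcb : c < cols) (hk : k < 4) (ch : Char) :
    (((((((r : Int) + ([(1 : Int), 0, -1, 0].getD k 0)) % rows).toNat : Int) -
        ([(1 : Int), 0, -1, 0].getD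
          (if ch = 'L' then ((if ch = 'L' then (k + 3) % 4 else if ch = 'R' then (k + 1) % 4 else k) + 1) % 4
           else if ch = 'R' then ((if ch = 'L' then (k + 3) % 4 else if ch = 'R' then (k + 1) % 4 else k) + 3) % 4
           else (if ch = 'L' then (k + 3) % 4 else if ch = 'R' then (k + 1) % 4 else k)) 0)) % rows).toNat * cols +
      ((((((c : Int) + ([(0 : Int), -1, 0, 1].getD k 0)) % cols).toNat : Int) -
        ([(0 : Int), -1, 0, 1].getD
          (if ch = 'L' then ((if ch = 'L' then (k + 3) % 4 else if ch = 'R' then (k + 1) % 4 else k) + 1) % 4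
           else if ch = 'R' then ((if ch = 'L' then (k + 3) % 4 else if ch = 'R' then (k + 1) % 4 else k) + 3) % 4
           else (if ch = 'L' then (k + 3) % 4 else if ch = 'R' then (k + 1) % 4 else k)) 0)) % cols).toNat) * 4 +
      (if ch = 'L' then ((if ch = 'L' then (k + 3) % 4 else if ch = 'R' then (k + 1) % 4 else k) + 1) % 4
       else if ch = 'R' then ((if ch = 'L' then (k + 3) % 4 else if ch = 'R' then (k + 1) % 4 else k) + 3) % 4
       else (if ch = 'L' then (k + 3) % 4 else if ch = 'R' then (k + 1) % 4 else k))
    = (r * cols + c) * 4 + k := by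
  have hrZ : (0 : Int) ≤ (r : Int) := by omega
  have hrM : (r : Int) < (rows : Int) := by exact_mod_cast hrb
  have hcNZ : (0 : Int) ≤ (c : Int) := by omega
  have hcM : (c : Int) < (cols : Int) := by exact_mod_cast hcb
  have hrP : (0 : Int) < (rows : Int) := by exact_mod_cast hr
  have hcP : (0 : Int) < (cols : Int) := by exact_mod_cast hc
  have hk' : (if ch = 'L' then ((if ch = 'L' then (k + 3) % 4 else if ch = 'R' then (k + 1) % 4 else k) + 1) % 4
       else if ch = 'R' then ((if ch = 'L' then (k + 3) % 4 else if ch = 'R' then (k + 1) % 4 else k) + 3) % 4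
       else (if ch = 'L' then (k + 3) % 4 else if ch = 'R' then (k + 1) % 4 else k)) = k := by
    split_ifs <;> omega
  rw [hk']
  have hrt : (((((r : Int) + ([(1 : Int), 0, -1, 0].getD k 0)) % rows).toNat : Int) -
      ([(1 : Int), 0, -1, 0].getD k 0)) % rows = (r : Int) := by
    rw [Int.toNat_of_nonneg (Int.emod_nonneg _ (by omega))]
    exact pv_unshift _ _ _ hrZ hrM
  have hct : (((((c : Int) + ([(0 : Int), -1, 0, 1].getD k 0)) % cols).toNat : Int) -
      ([(0 : Int), -1, 0, 1].getD k 0)) % cols = (c : Int) := by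
    rw [Int.toNat_of_nonneg (Int.emod_nonneg _ (by omega))]
    exact pv_unshift _ _ _ hcNZ hcM
  rw [hrt, hct]
  simp

theorem stepInv_stepB (grid : List String) {rows cols : Nat} (hr : 0 < rows) (hc : 0 < cols)
    {s : Nat} (hs : s < rows * cols * 4) :
    stepInv grid rows cols (stepB grid rows cols s) = s := by
  have hrZ : (0 : Int) < rows := by exact_mod_cast hr
  have hcZ : (0 : Int) < cols := by exact_mod_cast hc
  have hk : s % 4 < 4 := by omega
  have hcb : (s / 4) % cols < cols := Nat.mod_lt _ hc
  have hrb : s / (4 * cols) < rows := by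
    apply Nat.div_lt_of_lt_mul
    have e : (4 * cols) * rows = rows * cols * 4 := by ring
    omega
  have e : (s / (4 * cols) * cols + (s / 4) % cols) * 4 + s % 4 = s := enc_dec cols s
  -- bounds of the destination cell
  have hR2 : ((((s / (4 * cols) : Nat) : Int) + ([(1 : Int), 0, -1, 0].getD (s % 4) 0)) % rows).toNat < rows := by
    have h1 := Int.emod_nonneg (((s / (4 * cols) : Nat) : Int) + ([(1 : Int), 0, -1, 0].getD (s % 4) 0)) (by omega : (rows : Int) ≠ 0)
    have h2 := Int.emod_lt_of_pos (((s / (4 * cols) : Nat) : Int) + ([(1 : Int), 0, -1, 0].getD (s % 4) 0)) hrZ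
    omega
  have hC2 : (((((s / 4) % cols : Nat) : Int) + ([(0 : Int), -1, 0, 1].getD (s % 4) 0)) % cols).toNat < cols := by
    have h1 := Int.emod_nonneg ((((s / 4) % cols : Nat) : Int) + ([(0 : Int), -1, 0, 1].getD (s % 4) 0)) (by omega : (cols : Int) ≠ 0)
    have h2 := Int.emod_lt_of_pos ((((s / 4) % cols : Nat) : Int) + ([(0 : Int), -1, 0, 1].getD (s % 4) 0)) hcZ
    omega
  have hK2 : (if (grid.getD (((((s / (4 * cols) : Nat) : Int) + ([(1 : Int), 0, -1, 0].getD (s % 4) 0)) % rows).toNat) "").toList.getD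
        ((((((s / 4) % cols : Nat) : Int) + ([(0 : Int), -1, 0, 1].getD (s % 4) 0)) % cols).toNat) ' ' = 'L' then (s % 4 + 3) % 4
      else if (grid.getD (((((s / (4 * cols) : Nat) : Int) + ([(1 : Int), 0, -1, 0].getD (s % 4) 0)) % rows).toNat) "").toList.getD
        ((((((s / 4) % cols : Nat) : Int) + ([(0 : Int), -1, 0, 1].getD (s % 4) 0)) % cols).toNat) ' ' = 'R' then (s % 4 + 1) % 4
      else s % 4) < 4 := by
    split_ifs <;> omega
  unfold stepB
  unfold stepInv
  simp only [dec_k hK2, dec_j hC2 hK2, dec_i hC2 hK2]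
  exact (pv_roundtrip hr hc hrb hcb hk _).trans e

theorem stepB_inj (grid : List String) {rows cols : Nat} (hr : 0 < rows) (hc : 0 < cols)
    {a b : Nat} (ha : a < rows * cols * 4) (hb : b < rows * cols * 4)
    (h : stepB grid rows cols a = stepB grid rows cols b) : a = b := by
  rw [← stepInv_stepB grid hr hc ha, ← stepInv_stepB grid hr hc hb, h]

-- ===== iterate facts for a permutation f of [0, n) =====

theorem pv_it_lt {f : Nat → Nat} {n : Nat} (hf : ∀ s, s < n → f s < n)
    {s : Nat} (hs : s < n) (t : Nat) : f^[t] s < n := by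
  induction t with
  | zero => simpa using hs
  | succ t ih => rw [Function.iterate_succ_apply']; exact hf _ ih

theorem pv_it_cancel {f : Nat → Nat} {n : Nat} (hf : ∀ s, s < n → f s < n)
    (hinj : ∀ a b, a < n → b < n → f a = f b → a = b)
    {a b : Nat} (ha : a < n) (hb : b < n) :
    ∀ t, f^[t] a = f^[t] b → a = b := by
  intro t
  induction t with
  | zero => simp
  | succ t ih =>
    rw [Function.iterate_succ_apply', Function.iterate_succ_apply']
    intro h
    exact ih (hinj _ _ (pv_it_lt hf ha t) (pv_it_lt hf hb t) h)

theorem pv_min_period {f : Nat → Nat} {n : Nat} (hf : ∀ s, s < n → f s < n)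
    (hinj : ∀ a b, a < n → b < n → f a = f b → a = b)
    {s : Nat} (hs : s < n) :
    ∃ L, 0 < L ∧ L ≤ n ∧ f^[L] s = s ∧ ∀ u, 0 < u → u < L → f^[u] s ≠ s := by
  have pigeon : ∃ L0, 0 < L0 ∧ L0 ≤ n ∧ f^[L0] s = s := by
    have hmaps : ∀ i ∈ Finset.range (n + 1), f^[i] s ∈ Finset.range n := by
      intro i _
      exact Finset.mem_range.mpr (pv_it_lt hf hs i)
    have hcard : (Finset.range n).card < (Finset.range (n + 1)).card := by
      simp
    obtain ⟨a, ha, b, hb, hab, heq⟩ :=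
      Finset.exists_ne_map_eq_of_card_lt_of_maps_to hcard hmaps
    rcases Nat.lt_or_ge a b with hlt | hge
    · refine ⟨b - a, by omega, by simp at hb; omega, ?_⟩
      have h1 : f^[a] (f^[b - a] s) = f^[a] s := by
        rw [← Function.iterate_add_apply, show a + (b - a) = b from by omega]
        exact heq.symm
      exact pv_it_cancel hf hinj (pv_it_lt hf hs _) hs a h1
    · have hlt : b < a := by omega
      refine ⟨a - b, by omega, by simp at ha; omega, ?_⟩
      have h1 : f^[b] (f^[a - b] s) = f^[b] s := by
        rw [← Function.iterate_add_apply, show b + (a - b) = a from by omega]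
        exact heq
      exact pv_it_cancel hf hinj (pv_it_lt hf hs _) hs b h1
  obtain ⟨L0, hL0p, hL0n, hL0ret⟩ := pigeon
  have hex : ∃ L, 0 < L ∧ f^[L] s = s := ⟨L0, hL0p, hL0ret⟩
  refine ⟨Nat.find hex, (Nat.find_spec hex).1, ?_, (Nat.find_spec hex).2, ?_⟩
  · exact le_trans (Nat.find_min' hex ⟨hL0p, hL0ret⟩) hL0n
  · intro u hu1 hu2 hue
    exact Nat.find_min hex hu2 ⟨hu1, hue⟩

theorem pv_it_mod {f : Nat → Nat} {s L : Nat} (hL : 0 < L) (hret : f^[L] s = s) :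
    ∀ t, f^[t] s = f^[t % L] s := by
  have aux : ∀ q a, f^[a + L * q] s = f^[a] s := by
    intro q
    induction q with
    | zero => intro a; simp
    | succ q ih =>
      intro a
      rw [show a + L * (q + 1) = (a + L * q) + L from by ring,
        Function.iterate_add_apply, hret]
      exact ih a
  intro t
  conv_lhs => rw [show t = t % L + L * (t / L) from (Nat.mod_add_div t L).symm]
  exact aux _ _

-- ===== the two walks, run to completion =====

theorem pv_walkF_run {f : Nat → Nat} {s C : Nat} (hC : 0 < C)
    (hgt : ∀ u, 0 < u → u < C → s < f^[u] s) (hle : f^[C] s ≤ s) :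
    ∀ fuel c, 0 < c → c ≤ C → C - c ≤ fuel →
      walkF f s fuel (f^[c] s) c = (f^[C] s, C) := by
  intro fuel
  induction fuel with
  | zero =>
    intro c hc0 hcC hfuel
    have he : c = C := by omega
    subst he
    rfl
  | succ fu ih =>
    intro c hc0 hcC hfuel
    by_cases he : c = C
    · subst he
      simp only [walkF]
      rw [if_neg (not_lt.mpr hle)]
    · have hlt : c < C := by omega
      simp only [walkF]
      rw [if_pos (hgt c hc0 hlt),
        show f (f^[c] s) = f^[c + 1] s from (Function.iterate_succ_apply' f c s).symm]
      exact ih (c + 1) (by omega) (by omega) (by omega)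

theorem pv_walkSeen_run {f : Nat → Nat} {n : Nat} (hf : ∀ s, s < n → f s < n)
    (hinj : ∀ a b, a < n → b < n → f a = f b → a = b)
    {s L : Nat} (hs : s < n) (hmin : ∀ t, s ≤ f^[t] s)
    (hL : 0 < L) (hret : f^[L] s = s) (hne : ∀ u, 0 < u → u < L → f^[u] s ≠ s) :
    ∀ fuel c seen, c ≤ L → seen.length = n →
      (∀ x, x < n → (seen.getD x false = true ↔ (∃ t, f^[t] x < s) ∨ (∃ t, t < c ∧ f^[t] s = x))) →
      L + 1 - c ≤ fuel →
      (walkSeen f fuel seen (f^[c] s) c).2 = L ∧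
      (walkSeen f fuel seen (f^[c] s) c).1.length = n ∧
      (∀ x, x < n → ((walkSeen f fuel seen (f^[c] s) c).1.getD x false = true ↔
        (∃ t, f^[t] x < s) ∨ (∃ t, t < L ∧ f^[t] s = x))) := by
  intro fuel
  induction fuel with
  | zero =>
    intro c seen hcL hlen hchar hfuel
    omega
  | succ fu ih =>
    intro c seen hcL hlen hchar hfuel
    have hcur_lt : f^[c] s < n := pv_it_lt hf hs c
    by_cases hce : c = L
    · rw [hce] at hchar ⊢
      have hseen : seen.getD (f^[L] s) false = true := by
        rw [hret]
        exact (hchar s hs).mpr (Or.inr ⟨0, hL, rfl⟩)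
      simp only [walkSeen]
      rw [if_pos hseen]
      exact ⟨rfl, hlen, fun x hx => hchar x hx⟩
    · have hclt : c < L := by omega
      have hnot : ¬ (seen.getD (f^[c] s) false = true) := by
        rw [hchar _ hcur_lt]
        rintro (⟨t, hts⟩ | ⟨t, htc, hteq⟩)
        · rw [← Function.iterate_add_apply] at hts
          exact absurd hts (not_lt.mpr (hmin (t + c)))
        · have h1 : f^[t] (f^[c - t] s) = f^[t] s := by
            rw [← Function.iterate_add_apply, show t + (c - t) = c from by omega]
            exact hteq.symm
          have h2 := pv_it_cancel hf hinj (pv_it_lt hf hs _) hs t h1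
          exact hne (c - t) (by omega) (by omega) h2
      simp only [walkSeen]
      rw [if_neg hnot,
        show f (f^[c] s) = f^[c + 1] s from (Function.iterate_succ_apply' f c s).symm]
      refine ih (c + 1) (seen.set (f^[c] s) true) (by omega) (by simpa using hlen) ?_ (by omega)
      intro x hx
      by_cases hxe : x = f^[c] s
      · subst hxe
        rw [pvGetD_set_self _ _ _ _ (by omega)]
        simp only [true_iff]
        exact Or.inr ⟨c, by omega, rfl⟩
      · rw [pvGetD_set_ne _ _ _ (fun h => hxe h.symm), hchar _ hx]
        constructor
        · rintro (h | ⟨t, htc, hteq⟩)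
          · exact Or.inl h
          · exact Or.inr ⟨t, by omega, hteq⟩
        · rintro (h | ⟨t, htc, hteq⟩)
          · exact Or.inl h
          · rcases Nat.lt_or_ge t c with h2 | h2
            · exact Or.inr ⟨t, h2, hteq⟩
            · have : t = c := by omega
              subst this
              exact absurd hteq.symm hxe

-- ===== seen-walk fold = leader fold, for a permutation of [0, n) =====

theorem pv_fold_eq {f : Nat → Nat} {n : Nat} (hf : ∀ s, s < n → f s < n)
    (hinj : ∀ a b, a < n → b < n → f a = f b → a = b) :
    ∀ m, m ≤ n →
      (((List.range m).foldl (fun (st : List Bool × List Int) s =>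
          if st.1.getD s false then st
          else
            let r := walkSeen f (n + 1) st.1 s 0
            (r.1, st.2 ++ [(r.2 : Int)])) (List.replicate n false, [])).1.length = n) ∧
      (∀ x, x < n →
        (((List.range m).foldl (fun (st : List Bool × List Int) s =>
          if st.1.getD s false then st
          else
            let r := walkSeen f (n + 1) st.1 s 0
            (r.1, st.2 ++ [(r.2 : Int)])) (List.replicate n false, [])).1.getD x false = true ↔
          ∃ t, f^[t] x < m)) ∧
      (((List.range m).foldl (fun (st : List Bool × List Int) s =>
          if st.1.getD s false then st
          else
            let r := walkSeen f (n + 1) st.1 s 0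
            (r.1, st.2 ++ [(r.2 : Int)])) (List.replicate n false, [])).2
        = (List.range m).foldl (fun (acc : List Int) s =>
            let r := walkF f s n (f s) 1
            if r.1 = s then acc ++ [(r.2 : Int)] else acc) []) := by
  intro m
  induction m with
  | zero =>
    intro _
    refine ⟨by simp, ?_, rfl⟩
    intro x hx
    simp only [List.range_zero, List.foldl_nil]
    rw [pvGetD_replicate]
    constructor
    · intro h; cases h
    · rintro ⟨t, ht⟩; omega
  | succ m ih =>
    intro hm1
    obtain ⟨ihlen, ihchar, ihcnt⟩ := ih (by omega)
    have hsm : m < n := by omega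
    simp only [List.range_succ, List.foldl_append, List.foldl_cons, List.foldl_nil]
    by_cases hseen : ∃ t, f^[t] m < m
    · -- the cycle of m was already counted: both sides skip
      have hgd : ((List.range m).foldl (fun (st : List Bool × List Int) s =>
          if st.1.getD s false then st
          else
            let r := walkSeen f (n + 1) st.1 s 0
            (r.1, st.2 ++ [(r.2 : Int)])) (List.replicate n false, [])).1.getD m false = true :=
        (ihchar m hsm).mpr hseen
      rw [if_pos hgd]
      obtain ⟨L, hL, hLn, hret, hne⟩ := pv_min_period hf hinj hsm
      obtain ⟨t0, ht0⟩ := hseen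
      have hr0 : f^[t0 % L] m < m := by rw [← pv_it_mod hL hret t0]; exact ht0
      have hr0p : 0 < t0 % L := by
        rcases Nat.eq_zero_or_pos (t0 % L) with h | h
        · rw [h] at hr0; simp at hr0
        · exact h
      have hr0L : t0 % L < L := Nat.mod_lt _ hL
      have hCex : ∃ cc, 0 < cc ∧ f^[cc] m ≤ m := ⟨t0 % L, hr0p, le_of_lt hr0⟩
      have hCp : 0 < Nat.find hCex := (Nat.find_spec hCex).1
      have hCle : f^[Nat.find hCex] m ≤ m := (Nat.find_spec hCex).2
      have hCr0 : Nat.find hCex ≤ t0 % L := Nat.find_min' hCex ⟨hr0p, le_of_lt hr0⟩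
      have hrun := pv_walkF_run (f := f) (s := m) (C := Nat.find hCex) hCp
        (fun u hu1 hu2 => not_le.mp (fun hle => Nat.find_min hCex hu2 ⟨hu1, hle⟩))
        hCle n 1 one_pos (by omega) (by omega)
      rw [Function.iterate_one] at hrun
      have hCne : f^[Nat.find hCex] m ≠ m := hne _ hCp (by omega)
      refine ⟨ihlen, ?_, ?_⟩
      · intro x hx
        rw [ihchar x hx]
        constructor
        · rintro ⟨t, ht⟩; exact ⟨t, by omega⟩
        · rintro ⟨t, ht⟩
          rcases Nat.lt_or_ge (f^[t] x) m with h2 | h2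
          · exact ⟨t, h2⟩
          · have hxe : f^[t] x = m := by omega
            refine ⟨t0 + t, ?_⟩
            rw [Function.iterate_add_apply, hxe]
            exact ht0
      · rw [ihcnt]
        simp only [hrun]
        rw [if_neg hCne]
    · -- m is the smallest state of a new cycle: both sides count it
      have hmin : ∀ t, m ≤ f^[t] m := by
        intro t
        by_contra h
        exact hseen ⟨t, by omega⟩
      obtain ⟨L, hL, hLn, hret, hne⟩ := pv_min_period hf hinj hsm
      have hgd : ((List.range m).foldl (fun (st : List Bool × List Int) s =>
          if st.1.getD s false then st
          else
            let r := walkSeen f (n + 1) st.1 s 0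
            (r.1, st.2 ++ [(r.2 : Int)])) (List.replicate n false, [])).1.getD m false = false := by
        rcases Bool.eq_false_or_eq_true (((List.range m).foldl (fun (st : List Bool × List Int) s =>
          if st.1.getD s false then st
          else
            let r := walkSeen f (n + 1) st.1 s 0
            (r.1, st.2 ++ [(r.2 : Int)])) (List.replicate n false, [])).1.getD m false) with h | h
        · exact absurd ((ihchar m hsm).mp h) hseen
        · exact h
      have hwalk := pv_walkSeen_run hf hinj hsm hmin hL hret hne (n + 1) 0
        ((List.range m).foldl (fun (st : List Bool × List Int) s =>
          if st.1.getD s false then st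
          else
            let r := walkSeen f (n + 1) st.1 s 0
            (r.1, st.2 ++ [(r.2 : Int)])) (List.replicate n false, [])).1
        (by omega) ihlen
        (by
          intro x hx
          rw [ihchar x hx]
          constructor
          · intro h; exact Or.inl h
          · rintro (h | ⟨t, ht, _⟩)
            · exact h
            · omega)
        (by omega)
      rw [Function.iterate_zero_apply] at hwalk
      have hrunF := pv_walkF_run (f := f) (s := m) (C := L) hL
        (fun u hu1 hu2 => lt_of_le_of_ne (hmin u) (Ne.symm (hne u hu1 hu2)))
        (le_of_eq hret) n 1 one_pos (by omega) (by omega)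
      rw [Function.iterate_one, hret] at hrunF
      rw [if_neg (by rw [hgd]; exact Bool.false_ne_true)]
      refine ⟨hwalk.2.1, ?_, ?_⟩
      · intro x hx
        rw [hwalk.2.2 x hx]
        constructor
        · rintro (⟨t, ht⟩ | ⟨t, htL, hteq⟩)
          · exact ⟨t, by omega⟩
          · refine ⟨L - t, ?_⟩
            rw [show L - t = L - t from rfl, ← hteq, ← Function.iterate_add_apply,
              show L - t + t = L from by omega, hret]
            omega
        · rintro ⟨u, hu⟩
          rcases Nat.lt_or_ge (f^[u] x) m with h2 | h2
          · exact Or.inl ⟨u, h2⟩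
          · have hxe : f^[u] x = m := by omega
            obtain ⟨Lx, hLx, hLxn, hretx, hnex⟩ := pv_min_period hf hinj hx
            have hux : f^[u % Lx] x = m := by rw [← pv_it_mod hLx hretx u]; exact hxe
            rcases Nat.eq_zero_or_pos (u % Lx) with h3 | h3
            · rw [h3] at hux
              simp only [Function.iterate_zero_apply] at hux
              exact Or.inr ⟨0, hL, by simp [hux]⟩
            · have hmlt : u % Lx < Lx := Nat.mod_lt _ hLx
              have hx2 : f^[Lx - u % Lx] m = x := by
                rw [← hux, ← Function.iterate_add_apply,
                  show Lx - u % Lx + u % Lx = Lx from Nat.sub_add_cancel (le_of_lt hmlt), hretx]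
              refine Or.inr ⟨(Lx - u % Lx) % L, Nat.mod_lt _ hL, ?_⟩
              rw [← pv_it_mod hL hret]
              exact hx2
      · rw [ihcnt, hwalk.1]
        simp only [hrunF]
        simp

-- ===== bisimulation: A's nested loops = the flat seen-walk over encoded states =====

theorem walk_bisim (grid : List String) (rows cols : Nat) :
    ∀ (fuel : Nat) (v : List (List (List Bool))) (seen : List Bool)
      (p : Nat × Nat × Nat) (cnt : Nat),
      (v.length = rows ∧ ∀ r ∈ v, r.length = cols ∧ ∀ c ∈ r, c.length = 4) →
      (∀ i j k, i < rows → j < cols → k < 4 →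
        getV v i j k = seen.getD ((i * cols + j) * 4 + k) false) →
      seen.length = rows * cols * 4 →
      p.1 < rows → p.2.1 < cols → p.2.2 < 4 →
      (loopA grid rows cols fuel v p cnt).2
          = (walkSeen (stepB grid rows cols) fuel seen ((p.1 * cols + p.2.1) * 4 + p.2.2) cnt).2
        ∧ ((loopA grid rows cols fuel v p cnt).1.length = rows ∧
            ∀ r ∈ (loopA grid rows cols fuel v p cnt).1, r.length = cols ∧ ∀ c ∈ r, c.length = 4)
        ∧ (∀ i j k, i < rows → j < cols → k < 4 →
            getV (loopA grid rows cols fuel v p cnt).1 i j k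
              = (walkSeen (stepB grid rows cols) fuel seen ((p.1 * cols + p.2.1) * 4 + p.2.2) cnt).1.getD
                  ((i * cols + j) * 4 + k) false)
        ∧ (walkSeen (stepB grid rows cols) fuel seen ((p.1 * cols + p.2.1) * 4 + p.2.2) cnt).1.length
            = rows * cols * 4 := by
  intro fuel
  induction fuel with
  | zero =>
    intro v seen p cnt hs hrel hlen hi hj hk
    exact ⟨rfl, hs, hrel, hlen⟩
  | succ f ih =>
    intro v seen p cnt hs hrel hlen hi hj hk
    have hcond := hrel _ _ _ hi hj hk
    simp only [loopA, walkSeen, ← hcond]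
    by_cases hvis : getV v p.1 p.2.1 p.2.2 = true
    · simp only [hvis, if_true]
      exact ⟨trivial, hs, hrel, hlen⟩
    · simp only [hvis]
      have hb := stepA_lt grid rows cols p (by omega) (by omega) hk
      have hnxt : stepB grid rows cols ((p.1 * cols + p.2.1) * 4 + p.2.2)
          = ((stepA grid rows cols p).1 * cols + (stepA grid rows cols p).2.1) * 4
            + (stepA grid rows cols p).2.2 := stepB_enc grid hi hj hk
      rw [hnxt]
      refine ih (setV v p.1 p.2.1 p.2.2) (seen.set ((p.1 * cols + p.2.1) * 4 + p.2.2) true)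
        (stepA grid rows cols p) (cnt + 1)
        (shapeV_setV v hs hi hj) ?_ (by simp [hlen]) hb.1 hb.2.1 hb.2.2
      -- the marked visited array still corresponds to the marked flat seen array
      intro i' j' k' hi' hj' hk'
      rw [getV_setV v hs hi hj hk]
      by_cases he : i' = p.1 ∧ j' = p.2.1 ∧ k' = p.2.2
      · obtain ⟨e1, e2, e3⟩ := he
        subst e1; subst e2; subst e3
        rw [if_pos ⟨rfl, rfl, rfl⟩,
          pvGetD_set_self _ _ _ _ (by rw [hlen]; exact enc_lt hi' hj' hk')]
      · rw [if_neg he, pvGetD_set_ne]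
        · exact hrel _ _ _ hi' hj' hk'
        · intro hEq
          obtain ⟨e1, e2, e3⟩ := enc_inj hj hk hj' hk' hEq
          exact he ⟨e1.symm, e2.symm, e3.symm⟩

theorem foldl_rel2 {α β γ : Type} (R : α → β → Prop) (f : α → γ → α) (g : β → γ → β)
    (P : γ → Prop) :
    ∀ (l : List γ), (∀ x ∈ l, P x) → (∀ a b x, P x → R a b → R (f a x) (g b x)) →
      ∀ a b, R a b → R (l.foldl f a) (l.foldl g b) := by
  intro l
  induction l with
  | nil => intro _ _ a b h; simpa using h
  | cons x xs ih =>
    intro hl hstep a b h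
    simp only [List.foldl_cons]
    exact ih (fun y hy => hl y (List.mem_cons_of_mem _ hy)) hstep _ _
      (hstep a b x (hl x (List.mem_cons_self)) h)

theorem range_mul_flatMap (a b : Nat) :
    List.range (a * b) = (List.range a).flatMap (fun i => (List.range b).map (fun j => i * b + j)) := by
  induction a with
  | zero => simp
  | succ n ih =>
    rw [show (n + 1) * b = n * b + b from by ring, List.range_add, ih, List.range_succ,
      List.flatMap_append]
    simp

-- A's nested scan equals the flat seen-walk scan (both under the final sort)
theorem main_core (grid : List String) (rows cols : Nat) :
    (((List.range rows).foldl (fun st i =>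
        (List.range cols).foldl (fun st j =>
          (List.range 4).foldl (fun (st : List (List (List Bool)) × List Int) k =>
            if getV st.1 i j k then st
            else
              let r := loopA grid rows cols (rows * cols * 4 + 1) st.1 (i, j, k) 0
              (r.1, st.2 ++ [(r.2 : Int)])) st) st)
      ((List.range rows).map (fun _ => (List.range cols).map (fun _ => (List.range 4).map (fun _ => false))),
        ([] : List Int))).2)
    = (((List.range (rows * cols * 4)).foldl (fun (st : List Bool × List Int) s =>
        if st.1.getD s false then st
        else
          let r := walkSeen (stepB grid rows cols) (rows * cols * 4 + 1) st.1 s 0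
          (r.1, st.2 ++ [(r.2 : Int)]))
      (List.replicate (rows * cols * 4) false, ([] : List Int))).2) := by
  rw [range_mul_flatMap (rows * cols) 4, List.foldl_flatMap]
  simp only [List.foldl_map]
  rw [range_mul_flatMap rows cols, List.foldl_flatMap]
  simp only [List.foldl_map]
  refine (foldl_rel2 (fun (stA : List (List (List Bool)) × List Int) (stB : List Bool × List Int) =>
      ((stA.1.length = rows ∧ ∀ r ∈ stA.1, r.length = cols ∧ ∀ c ∈ r, c.length = 4) ∧
        (∀ i j k, i < rows → j < cols → k < 4 →
          getV stA.1 i j k = stB.1.getD ((i * cols + j) * 4 + k) false) ∧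
        stB.1.length = rows * cols * 4 ∧ stA.2 = stB.2)) _ _ (fun i => i < rows)
    (List.range rows) (fun x hx => List.mem_range.mp hx) ?_ _ _
    ⟨⟨by simp, ?_⟩, ?_, by simp, rfl⟩).2.2.2
  · intro a b i hi hR
    refine foldl_rel2 (fun (stA : List (List (List Bool)) × List Int) (stB : List Bool × List Int) =>
      ((stA.1.length = rows ∧ ∀ r ∈ stA.1, r.length = cols ∧ ∀ c ∈ r, c.length = 4) ∧
        (∀ i j k, i < rows → j < cols → k < 4 →
          getV stA.1 i j k = stB.1.getD ((i * cols + j) * 4 + k) false) ∧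
        stB.1.length = rows * cols * 4 ∧ stA.2 = stB.2)) _ _ (fun j => j < cols) (List.range cols)
      (fun x hx => List.mem_range.mp hx) ?_ _ _ hR
    intro a b j hj hR
    refine foldl_rel2 (fun (stA : List (List (List Bool)) × List Int) (stB : List Bool × List Int) =>
      ((stA.1.length = rows ∧ ∀ r ∈ stA.1, r.length = cols ∧ ∀ c ∈ r, c.length = 4) ∧
        (∀ i j k, i < rows → j < cols → k < 4 →
          getV stA.1 i j k = stB.1.getD ((i * cols + j) * 4 + k) false) ∧
        stB.1.length = rows * cols * 4 ∧ stA.2 = stB.2)) _ _ (fun k => k < 4) (List.range 4)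
      (fun x hx => List.mem_range.mp hx) ?_ _ _ hR
    intro st st' k hk hR
    obtain ⟨hsh, hrel, hlen, hans⟩ := hR
    have hcond := hrel i j k hi hj hk
    by_cases hvis : getV st.1 i j k = true
    · have hvis' : st'.1.getD ((i * cols + j) * 4 + k) false = true := by
        rw [← hcond]; exact hvis
      rw [if_pos hvis, if_pos hvis']
      exact ⟨hsh, hrel, hlen, hans⟩
    · have hvis' : ¬ st'.1.getD ((i * cols + j) * 4 + k) false = true := by
        rw [← hcond]; exact hvis
      rw [if_neg hvis, if_neg hvis']
      have hb := walk_bisim grid rows cols (rows * cols * 4 + 1) st.1 st'.1 (i, j, k) 0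
        hsh hrel hlen hi hj hk
      exact ⟨hb.2.1, hb.2.2.1, hb.2.2.2, by rw [hans, hb.1]⟩
  · -- the initial 3D visited array is well-shaped
    intro r hr
    simp only [List.mem_map] at hr
    obtain ⟨_, _, rfl⟩ := hr
    refine ⟨by simp, ?_⟩
    intro c hc
    simp only [List.mem_map] at hc
    obtain ⟨_, _, rfl⟩ := hc
    simp
  · -- initially nothing is visited on either side
    intro i j k hi hj hk
    unfold getV
    rw [PySem.List.getD_map_range _ _ _ _ hi, PySem.List.getD_map_range _ _ _ _ hj,
      PySem.List.getD_map_range _ _ _ _ hk, pvGetD_replicate]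

theorem walkLeader_eq_walkF (grid : List String) (rows cols s : Nat) :
    ∀ fuel cur cnt, walkLeader grid rows cols s fuel cur cnt
      = walkF (stepB grid rows cols) s fuel cur cnt := by
  intro fuel
  induction fuel with
  | zero => intro cur cnt; rfl
  | succ f ih =>
    intro cur cnt
    simp only [walkLeader, walkF]
    split
    · exact ih _ _
    · rfl

-- ===== VERDICT (by name: the statement is the Claim_ definition above) =====
theorem solution_spec : Claim_equal_solution := by
  unfold Claim_equal_solution
  intro grid _hdom _hpre
  show solution grid = solution_alt grid
  have hA : solution grid = PySem.List.sorted
      (((List.range (grid.length * (grid.headD "").length * 4)).foldl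
        (fun (st : List Bool × List Int) s =>
          if st.1.getD s false then st
          else
            let r := walkSeen (stepB grid grid.length ((grid.headD "").length))
              (grid.length * (grid.headD "").length * 4 + 1) st.1 s 0
            (r.1, st.2 ++ [(r.2 : Int)]))
        (List.replicate (grid.length * (grid.headD "").length * 4) false, ([] : List Int))).2)
      (fun x => x) false :=
    congrArg (fun l => PySem.List.sorted l (fun x => x) false)
      (main_core grid grid.length ((grid.headD "").length))
  have hB : solution_alt grid = PySem.List.sorted
      ((List.range (grid.length * (grid.headD "").length * 4)).foldl
        (fun (acc : List Int) s =>
          let r := walkF (stepB grid grid.length ((grid.headD "").length)) s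
            (grid.length * (grid.headD "").length * 4)
            (stepB grid grid.length ((grid.headD "").length) s) 1
          if r.1 = s then acc ++ [(r.2 : Int)] else acc) [])
      (fun x => x) false := by
    unfold solution_alt
    simp only [walkLeader_eq_walkF]
  rw [hA, hB]
  have hcounts : (((List.range (grid.length * (grid.headD "").length * 4)).foldl
        (fun (st : List Bool × List Int) s =>
          if st.1.getD s false then st
          else
            let r := walkSeen (stepB grid grid.length ((grid.headD "").length))
              (grid.length * (grid.headD "").length * 4 + 1) st.1 s 0
            (r.1, st.2 ++ [(r.2 : Int)]))
        (List.replicate (grid.length * (grid.headD "").length * 4) false, ([] : List Int))).2)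
      = ((List.range (grid.length * (grid.headD "").length * 4)).foldl
        (fun (acc : List Int) s =>
          let r := walkF (stepB grid grid.length ((grid.headD "").length)) s
            (grid.length * (grid.headD "").length * 4)
            (stepB grid grid.length ((grid.headD "").length) s) 1
          if r.1 = s then acc ++ [(r.2 : Int)] else acc) []) := by
    rcases Nat.eq_zero_or_pos (grid.length * (grid.headD "").length * 4) with h0 | hpos
    · rw [h0]
      simp
    · have hR : 0 < grid.length := by
        rcases Nat.eq_zero_or_pos grid.length with h1 | h1
        · rw [h1] at hpos; simp at hpos
        · exact h1
      have hC : 0 < (grid.headD "").length := by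
        rcases Nat.eq_zero_or_pos (grid.headD "").length with h1 | h1
        · rw [h1] at hpos; simp at hpos
        · exact h1
      exact (pv_fold_eq (fun s _ => stepB_lt grid hR hC s)
        (fun a b ha hb h => stepB_inj grid hR hC ha hb h)
        (grid.length * (grid.headD "").length * 4) le_rfl).2.2
  rw [hcounts]
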